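-- pv_equiv track=rewrite | github.com/SujeethJinesh/LatentWire | scripts/build_condition_likelihood_candidate_pools.py | _by_id
-- ===== SOURCE A (Python) =====
-- from typing import Any, Sequence
--
-- def _by_id(rows: Sequence[dict[str, Any]]) -> dict[str, dict[str, Any]]:
--     out: dict[str, dict[str, Any]] = {}
--     duplicates: set[str] = set()
--     for row in rows:
--         example_id = str(row["example_id"])
--         if example_id in out:
--             duplicates.add(example_id)
--         out[example_id] = dict(row)
--     if duplicates:
--         raise ValueError(f"Duplicate example_id values: {sorted(duplicates)}")
--     return out
-- ===== SOURCE B (Python) =====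
-- from typing import Any, Sequence
--
-- def _by_id(rows: Sequence[dict[str, Any]]) -> dict[str, dict[str, Any]]:
--     counts: dict[str, int] = {}
--     for row in rows:
--         k = str(row["example_id"])
--         counts[k] = counts.get(k, 0) + 1
--     duplicates = {k for k, c in counts.items() if c > 1}
--     if duplicates:
--         raise ValueError(f"Duplicate example_id values: {sorted(duplicates)}")
--     return {str(row["example_id"]): dict(row) for row in rows}
-- ===== Notes on version B (the rewrite author's own statement) =====
-- stated objective: alternative
-- what changed: A interleaves duplicate detection with building the result in one pass; B first counts example_ids in a dict, raises on any count > 1, and then builds the result in a separate comprehension pass.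
-- outside the precondition, e.g. on _by_id([{'example_id': 'a'}, {'example_id': 'a'}]): A raises ValueError, B raises ValueError; on _by_id([{'x': '1'}]): A raises KeyError, B raises KeyError
import Mathlib
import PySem

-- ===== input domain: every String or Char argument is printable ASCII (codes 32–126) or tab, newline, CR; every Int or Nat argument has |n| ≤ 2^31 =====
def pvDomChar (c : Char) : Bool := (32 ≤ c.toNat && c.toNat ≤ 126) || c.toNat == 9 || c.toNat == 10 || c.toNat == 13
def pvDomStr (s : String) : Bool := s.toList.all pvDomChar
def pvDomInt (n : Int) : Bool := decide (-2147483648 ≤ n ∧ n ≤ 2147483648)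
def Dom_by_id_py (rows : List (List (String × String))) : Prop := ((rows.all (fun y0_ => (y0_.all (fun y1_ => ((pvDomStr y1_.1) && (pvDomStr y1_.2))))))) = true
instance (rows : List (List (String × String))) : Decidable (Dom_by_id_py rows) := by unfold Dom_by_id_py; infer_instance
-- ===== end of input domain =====

-- B separates duplicate detection (a counting pass) from result construction (a second pass),
-- instead of A's single interleaved pass; objective: alternative decomposition, not speed.
-- Each Python row argument is a dict: it is modelled as PySem.Dict.ofList row in both ports.

-- ===== PORT A =====
def by_id_py (rows : List (List (String × String))) : List (String × List (String × String)) :=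
  -- 'if duplicates: raise ValueError(...)' at the end — Pre_ excludes those inputs
  (rows.foldl
    (fun (st : PySem.Dict String (List (String × String)) × PySem.Set String) row =>
      match (PySem.Dict.ofList row).get? "example_id" with
      | none => st  -- row["example_id"]: Python raises KeyError here; excluded by Pre_
      | some eid =>
          (st.1.insert eid (PySem.Dict.ofList row).items,
           if st.1.contains eid then PySem.Set.add st.2 eid else st.2))
    (PySem.Dict.empty, PySem.Set.empty)).1.items

-- ===== PORT B =====
-- first pass of B: counts[k] = counts.get(k, 0) + 1 over the example_ids
def bCounts (rows : List (List (String × String))) : PySem.Dict String Int :=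
  rows.foldl
    (fun (d : PySem.Dict String Int) row =>
      match (PySem.Dict.ofList row).get? "example_id" with
      | none => d  -- KeyError; excluded by Pre_
      | some k => d.insert k (d.getD k 0 + 1))
    PySem.Dict.empty

def by_id_py_alt (rows : List (List (String × String))) : List (String × List (String × String)) :=
  if PySem.Set.ofList (((bCounts rows).items.filter (fun p => decide (1 < p.2))).map (·.1))
      = ([] : PySem.Set String) then
    (rows.foldl
      (fun (out : PySem.Dict String (List (String × String))) row =>
        match (PySem.Dict.ofList row).get? "example_id" with
        | none => out  -- KeyError; excluded by Pre_
        | some k => out.insert k (PySem.Dict.ofList row).items)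
      PySem.Dict.empty).items
  else []  -- 'raise ValueError(...)' — excluded by Pre_

-- ===== PRECONDITION & SPEC =====
-- Pre_ excludes exactly the inputs where A raises: a row without an "example_id" key
-- (KeyError) or duplicate example_id values (ValueError). A returns on all other inputs.
def Pre_by_id_py (rows : List (List (String × String))) : Prop :=
  (∀ row ∈ rows, ((PySem.Dict.ofList row).get? "example_id").isSome = true) ∧
  (rows.filterMap (fun row => (PySem.Dict.ofList row).get? "example_id")).Nodup
instance (rows : List (List (String × String))) : Decidable (Pre_by_id_py rows) := by
  unfold Pre_by_id_py; infer_instance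

def pvWitness_by_id_py : (List (List (String × String))) :=
  [[("example_id", "a")], [("example_id", "b"), ("x", "y")]]

def Spec_by_id_py (rows : List (List (String × String))) (out : List (String × List (String × String))) : Prop := out = by_id_py_alt rows
instance (rows : List (List (String × String))) (out : List (String × List (String × String))) : Decidable (Spec_by_id_py rows out) := by unfold Spec_by_id_py; infer_instance

-- ===== CLAIM (what is proved, stated in full; the proofs are below) =====
def Claim_equal_by_id_py : Prop := ∀ (rows : List (List (String × String))), Dom_by_id_py rows → Pre_by_id_py rows → Spec_by_id_py rows (by_id_py rows)

-- ===== LEMMAS AND PROOFS =====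

-- A's dict component ignores the duplicate set: its fold's first projection is B's second fold.
theorem fst_foldA_eq_foldB (rows : List (List (String × String)))
    (d : PySem.Dict String (List (String × String))) (s : PySem.Set String) :
    (rows.foldl
      (fun (st : PySem.Dict String (List (String × String)) × PySem.Set String) row =>
        match (PySem.Dict.ofList row).get? "example_id" with
        | none => st
        | some eid =>
            let dups := if st.1.contains eid then PySem.Set.add st.2 eid else st.2
            (st.1.insert eid (PySem.Dict.ofList row).items, dups))
      (d, s)).1
    = rows.foldl
      (fun (out : PySem.Dict String (List (String × String))) row =>
        match (PySem.Dict.ofList row).get? "example_id" with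
        | none => out
        | some k => out.insert k (PySem.Dict.ofList row).items)
      d := by
  induction rows generalizing d s with
  | nil => rfl
  | cons r t ih =>
      simp only [List.foldl_cons]
      cases h : (PySem.Dict.ofList r).get? "example_id" <;> simp [ih]

-- B's counting fold over rows is the counter fold over the extracted id list.
theorem foldC_eq_foldl_ids (rows : List (List (String × String)))
    (d : PySem.Dict String Int)
    (h : ∀ row ∈ rows, ((PySem.Dict.ofList row).get? "example_id").isSome = true) :
    rows.foldl
      (fun (d : PySem.Dict String Int) row =>
        match (PySem.Dict.ofList row).get? "example_id" with
        | none => d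
        | some k => d.insert k (d.getD k 0 + 1))
      d
    = (rows.filterMap (fun row => (PySem.Dict.ofList row).get? "example_id")).foldl
        (fun d k => d.insert k (d.getD k 0 + 1)) d := by
  induction rows generalizing d with
  | nil => rfl
  | cons r t ih =>
      have hr := h r (List.mem_cons_self ..)
      cases hk : (PySem.Dict.ofList r).get? "example_id" with
      | none => rw [hk] at hr; simp at hr
      | some k =>
          simp only [List.foldl_cons, List.filterMap_cons, hk]
          exact ih _ (fun row hm => h row (List.mem_cons_of_mem _ hm))

-- Under Pre_, B's duplicates set is empty.
theorem dups_nil (rows : List (List (String × String))) (hpre : Pre_by_id_py rows) :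
    PySem.Set.ofList (((bCounts rows).items.filter (fun p => decide (1 < p.2))).map (·.1))
    = ([] : PySem.Set String) := by
  obtain ⟨hsome, hnd⟩ := hpre
  set ids := rows.filterMap (fun row => (PySem.Dict.ofList row).get? "example_id") with hids
  rw [bCounts, foldC_eq_foldl_ids rows _ hsome, PySem.Dict.foldl_insert_getD_add_one_eq_counter,
      PySem.Dict.items_counter]
  have hfil : ((PySem.Set.ofList ids).map (fun k => (k, (ids.count k : Int)))).filter
      (fun p => decide (1 < p.2)) = [] := by
    rw [List.filter_eq_nil_iff]
    intro p hp
    obtain ⟨k, hk, rfl⟩ := List.mem_map.mp hp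
    have hkmem : k ∈ ids := (PySem.Set.mem_ofList _ _).mp hk
    have hle : ids.count k ≤ 1 := List.nodup_iff_count_le_one.mp hnd k
    simp only [decide_eq_true_eq, not_lt]
    exact_mod_cast hle
  rw [hfil]
  rfl

-- ===== VERDICT (by name: the statement is the Claim_ definition above) =====
theorem by_id_py_spec : Claim_equal_by_id_py := by
  intro rows _ hpre
  unfold Spec_by_id_py by_id_py by_id_py_alt
  rw [if_pos (dups_nil rows hpre), fst_foldA_eq_foldB]
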